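-- pv_equiv track=rewrite | github.com/Jeff-Stoyanoff/Algo-Practice | codewars.py | max_sum_between_two_negatives
-- ===== SOURCE A (Python) =====
-- def max_sum_between_two_negatives(my_list):
--     new_list = []
--     x = min(my_list)
--     neg_count = 0
--
--     for i in my_list:
--         if i < 0:
--             neg_count += 1
--             new_list.append(i)
--     if neg_count < 2:
--         return "The list must contain two negative numbers"
--
--     y = max(new_list)
--     z = abs(x - y)
--
--     return z
-- ===== SOURCE B (Python) =====
-- def max_sum_between_two_negatives(my_list):
--     # Sort once; the overall minimum is s[0] and, since negatives form a
--     # prefix of the sorted list, the largest negative is s[k-1] where k is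
--     # the length of that negative prefix.
--     s = sorted(my_list)
--     k = 0
--     while k < len(s) and s[k] < 0:
--         k += 1
--     if k < 2:
--         return "The list must contain two negative numbers"
--     return abs(s[0] - s[k - 1])
-- ===== Notes on version B (the rewrite author's own statement) =====
-- stated objective: alternative
-- what changed: A scans the list three times (min(), a filter loop building the negatives list, max() over it); B sorts the list once and reads both answers off the sorted order: the overall minimum is s[0] and the largest negative is the last element s[k-1] of the negative prefix, found by a single prefix scan; trades O(n) passes for one O(n log n) sort.
-- outside the precondition, e.g. on max_sum_between_two_negatives([]): A raises ValueError, B returns 'The list must contain two negative numbers'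
import Mathlib
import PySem

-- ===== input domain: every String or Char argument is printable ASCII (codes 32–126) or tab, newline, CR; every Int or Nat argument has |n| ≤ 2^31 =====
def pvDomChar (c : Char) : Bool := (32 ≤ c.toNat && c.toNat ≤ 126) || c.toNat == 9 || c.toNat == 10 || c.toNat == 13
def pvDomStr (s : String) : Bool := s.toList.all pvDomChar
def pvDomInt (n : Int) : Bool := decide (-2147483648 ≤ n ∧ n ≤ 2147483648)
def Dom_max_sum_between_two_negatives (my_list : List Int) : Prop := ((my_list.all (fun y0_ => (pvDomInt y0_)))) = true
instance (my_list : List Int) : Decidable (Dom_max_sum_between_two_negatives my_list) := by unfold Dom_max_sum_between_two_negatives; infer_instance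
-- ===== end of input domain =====

-- B replaces A's three scans (min(), a filter loop, max()) by one sort plus a prefix scan of the sorted list; objective: alternative algorithm.


-- ===== PORT A =====
-- loop body: if i < 0 then append i to new_list and bump neg_count
def pvAStep (acc : List Int × Int) (i : Int) : List Int × Int :=
  if i < 0 then (acc.1 ++ [i], acc.2 + 1) else acc

def max_sum_between_two_negatives (my_list : List Int) : Int :=
  match PySem.List.min? my_list (fun y => y) with
  | none => 0  -- min([]) raises ValueError: outside Pre_
  | some x =>
    let st := my_list.foldl pvAStep ([], 0)
    if st.2 < 2 then 0  -- Python returns a string here: outside Pre_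
    else
      match PySem.List.max? st.1 (fun y => y) with
      | none => 0  -- unreachable: new_list nonempty when neg_count ≥ 2
      | some y => |x - y|

-- ===== PORT B =====
-- the while loop: length of the negative prefix of the sorted list
def pvNegPrefix : List Int → Nat
  | [] => 0
  | h :: t => if h < 0 then pvNegPrefix t + 1 else 0

def max_sum_between_two_negatives_alt (my_list : List Int) : Int :=
  let s := PySem.List.sorted my_list (fun y => y) false
  let k := pvNegPrefix s
  if k < 2 then 0  -- Python returns the message string here: outside Pre_
  else
    match PySem.List.pyGet? s 0, PySem.List.pyGet? s ((k : Int) - 1) with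
    | some a, some b => |a - b|
    | _, _ => 0  -- unreachable when k ≥ 2

-- ===== PRECONDITION & SPEC =====
-- Pre_ excludes the inputs on which A does not return an int: the empty list (min() raises
-- ValueError) and lists with fewer than two negative elements (A returns the message string).
def Pre_max_sum_between_two_negatives (my_list : List Int) : Prop :=
  2 ≤ (my_list.filter (fun v => decide (v < 0))).length
instance (my_list : List Int) : Decidable (Pre_max_sum_between_two_negatives my_list) := by unfold Pre_max_sum_between_two_negatives; infer_instance
def pvWitness_max_sum_between_two_negatives : List Int := [3, -2, 5, -7, 1]

def Spec_max_sum_between_two_negatives (my_list : List Int) (out : Int) : Prop := out = max_sum_between_two_negatives_alt my_list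
instance (my_list : List Int) (out : Int) : Decidable (Spec_max_sum_between_two_negatives my_list out) := by unfold Spec_max_sum_between_two_negatives; infer_instance

-- ===== CLAIM (what is proved, stated in full; the proofs are below) =====
def Claim_equal_max_sum_between_two_negatives : Prop := ∀ (my_list : List Int), Dom_max_sum_between_two_negatives my_list → Pre_max_sum_between_two_negatives my_list → Spec_max_sum_between_two_negatives my_list (max_sum_between_two_negatives my_list)

-- ===== LEMMAS AND PROOFS =====

-- A's loop leaves new_list = acc ++ negatives of l, neg_count bumped by their number.
lemma afold (l : List Int) : ∀ (acc : List Int) (n : Int),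
    l.foldl pvAStep (acc, n)
      = (acc ++ l.filter (fun v => decide (v < 0)),
         n + ((l.filter (fun v => decide (v < 0))).length : Int)) := by
  induction l with
  | nil => intro acc n; simp
  | cons h t ih =>
    intro acc n
    by_cases hh : h < 0
    · simp [pvAStep, hh, ih]
      omega
    · simp [pvAStep, hh, ih]

-- on a ≤-sorted list the negatives are exactly the prefix the while loop counts
lemma negPrefix_eq (s : List Int) (hs : s.Pairwise (· ≤ ·)) :
    pvNegPrefix s = (s.filter (fun v => decide (v < 0))).length := by
  induction s with
  | nil => rfl
  | cons h t ih =>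
    rcases List.pairwise_cons.mp hs with ⟨hle, hp⟩
    by_cases hh : h < 0
    · simp [pvNegPrefix, hh, ih hp]
    · have hnil : t.filter (fun v => decide (v < 0)) = [] := by
        apply List.filter_eq_nil_iff.mpr
        intro z hz
        have := hle z hz
        simp; omega
      simp [pvNegPrefix, hh, hnil]

-- the last element of the negative prefix is the maximum negative
lemma maxAt (s : List Int) (hs : s.Pairwise (· ≤ ·)) (hk : 1 ≤ pvNegPrefix s) :
    ∃ m, PySem.List.pyGet? s ((pvNegPrefix s : Int) - 1) = some m ∧
      m ∈ s.filter (fun v => decide (v < 0)) ∧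
      ∀ z ∈ s.filter (fun v => decide (v < 0)), z ≤ m := by
  induction s with
  | nil => simp [pvNegPrefix] at hk
  | cons h t ih =>
    rcases List.pairwise_cons.mp hs with ⟨hle, hp⟩
    by_cases hh : h < 0
    · by_cases ht : 1 ≤ pvNegPrefix t
      · obtain ⟨m, hget, hmem, hmax⟩ := ih hp ht
        refine ⟨m, ?_, ?_, ?_⟩
        · have : ((pvNegPrefix (h :: t) : Int) - 1) = ((pvNegPrefix t - 1 : Nat) : Int) + 1 := by
            simp [pvNegPrefix, hh]; omega
          rw [this, PySem.List.pyGet?_cons_succ]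
          have : ((pvNegPrefix t - 1 : Nat) : Int) = (pvNegPrefix t : Int) - 1 := by omega
          rw [this]; exact hget
        · simp [hh]
          right; simpa using hmem
        · intro z hz
          simp [hh] at hz
          rcases hz with rfl | hz
          · exact hle m (List.mem_of_mem_filter hmem)
          · exact hmax z (by simpa using hz)
      · have ht0 : pvNegPrefix t = 0 := by omega
        have hnil : t.filter (fun v => decide (v < 0)) = [] := by
          cases t with
          | nil => rfl
          | cons h' t' =>
            rcases List.pairwise_cons.mp hp with ⟨hle', _⟩
            have hh' : ¬ h' < 0 := by
              intro hc; simp [pvNegPrefix, hc] at ht0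
            apply List.filter_eq_nil_iff.mpr
            intro z hz
            simp at hz
            rcases hz with rfl | hz
            · simp; omega
            · have := hle' z hz; simp; omega
        refine ⟨h, ?_, ?_, ?_⟩
        · have : ((pvNegPrefix (h :: t) : Int) - 1) = 0 := by
            simp [pvNegPrefix, hh, ht0]
          rw [this, PySem.List.pyGet?_zero_cons]
        · simp [hh]
        · intro z hz
          simp [hh, hnil] at hz
          omega
    · simp [pvNegPrefix, hh] at hk

-- ===== VERDICT (by name: the statement is the Claim_ definition above) =====
theorem max_sum_between_two_negatives_spec : Claim_equal_max_sum_between_two_negatives := by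
  intro l _ hpre
  unfold Pre_max_sum_between_two_negatives at hpre
  unfold Spec_max_sum_between_two_negatives
  unfold max_sum_between_two_negatives max_sum_between_two_negatives_alt
  set s := PySem.List.sorted l (fun y => y) false with hsdef
  have hperm : s.Perm l := PySem.List.sorted_perm l (fun y => y) false
  have hpair : s.Pairwise (· ≤ ·) := PySem.List.sorted_pairwise l (fun y => y)
  have hfperm : (s.filter (fun v => decide (v < 0))).Perm (l.filter (fun v => decide (v < 0))) :=
    hperm.filter _
  have hk : pvNegPrefix s = (l.filter (fun v => decide (v < 0))).length := by
    rw [negPrefix_eq s hpair, hfperm.length_eq]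
  have hk2 : 2 ≤ pvNegPrefix s := by omega
  -- B's branches
  have hkif : ¬ pvNegPrefix s < 2 := by omega
  obtain ⟨m, hget, hmem, hmax⟩ := maxAt s hpair (by omega)
  -- s nonempty, head
  obtain ⟨h0, t0, hcons⟩ : ∃ h0 t0, s = h0 :: t0 := by
    cases hsc : s with
    | nil => rw [hsc] at hk2; simp [pvNegPrefix] at hk2
    | cons a b => exact ⟨a, b, rfl⟩
  have hget0 : PySem.List.pyGet? s 0 = some h0 := by
    rw [hcons]; exact PySem.List.pyGet?_zero_cons _ _
  have hcons' : PySem.List.sorted l (fun y : Int => y) false = h0 :: t0 := by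
    rw [← hsdef]; exact hcons
  have hhead : ∀ y ∈ l, h0 ≤ y := PySem.List.key_head_sorted_le l (fun y => y) hcons'
  -- l nonempty → min? is some
  have hlne : l ≠ [] := by
    intro h; subst h; simp at hpre
  cases hx : PySem.List.min? l (fun y => y) with
  | none => exact absurd ((PySem.List.min?_eq_none_iff l (fun y => y)).mp hx) hlne
  | some x =>
    have hxmem : x ∈ l := PySem.List.min?_mem hx
    have hxmin : ∀ y ∈ l, x ≤ y := PySem.List.min?_isMin hx
    have hx0 : x = h0 :=
      le_antisymm (hxmin h0 (hperm.mem_iff.mp (by rw [hcons]; simp)))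
        (hhead x hxmem)
    rw [afold]
    simp only [List.nil_append]
    have hcif : ¬ ((0 : Int) + ((l.filter (fun v => decide (v < 0))).length : Int) < 2) := by omega
    simp only [hcif, if_false]
    cases hy : PySem.List.max? (l.filter (fun v => decide (v < 0))) (fun y => y) with
    | none =>
      have hnil := (PySem.List.max?_eq_none_iff _ (fun y => y)).mp hy
      simp [hnil] at hpre
    | some y =>
      have hymem : y ∈ l.filter (fun v => decide (v < 0)) := PySem.List.max?_mem hy
      have hymax : ∀ z ∈ l.filter (fun v => decide (v < 0)), z ≤ y := PySem.List.max?_isMax hy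
      have hym : y = m :=
        le_antisymm (hmax y (hfperm.mem_iff.mpr hymem)) (hymax m (hfperm.mem_iff.mp hmem))
      simp only [hkif, if_false, hget0, hget, hx0, hym]
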